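-- pv_equiv track=rewrite | github.com/Sam120204/CCC_Junior | CCC/lesson1/lists_sol.py | sumUntilEven
-- ===== SOURCE A (Python) =====
-- def sumUntilEven(lst):
-- 	if len(lst) == 0:
-- 		return 0
-- 	res = 0
-- 	for e in lst:
-- 		if e % 2 == 1:
-- 			res = res + e
-- 		else:
-- 			break
-- 	return res
-- ===== SOURCE B (Python) =====
-- def sumUntilEven(lst):
-- 	idx = next((i for i, e in enumerate(lst) if e % 2 == 0), len(lst))
-- 	return sum(lst[:idx])
-- ===== Notes on version B (the rewrite author's own statement) =====
-- stated objective: idiomatic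
-- what changed: Replaced the accumulate-and-break loop by a boundary-first decomposition: find the index of the first even element, then sum the prefix before it.
import Mathlib
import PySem

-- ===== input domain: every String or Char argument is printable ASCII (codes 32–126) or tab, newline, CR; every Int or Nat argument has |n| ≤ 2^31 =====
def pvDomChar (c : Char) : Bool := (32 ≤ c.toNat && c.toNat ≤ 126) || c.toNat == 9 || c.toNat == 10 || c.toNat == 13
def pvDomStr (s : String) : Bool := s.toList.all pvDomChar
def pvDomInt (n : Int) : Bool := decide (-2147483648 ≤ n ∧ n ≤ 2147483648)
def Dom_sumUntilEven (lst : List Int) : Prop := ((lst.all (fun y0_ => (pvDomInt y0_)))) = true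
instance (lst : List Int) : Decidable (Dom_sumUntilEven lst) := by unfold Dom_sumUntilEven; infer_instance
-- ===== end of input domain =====

-- B: boundary-first decomposition (find first even index, then sum that prefix) instead of A's accumulate-and-break loop; idiomatic, same cost.
-- ===== PORT A =====
-- the for-loop with break, as structural recursion over the same state (res)
def sumUntilEvenLoop (lst : List Int) (res : Int) : Int :=
  match lst with
  | [] => res
  | e :: rest => if PySem.Int.mod e 2 = 1 then sumUntilEvenLoop rest (res + e) else res

def sumUntilEven (lst : List Int) : Int :=
  if lst.length = 0 then 0 else sumUntilEvenLoop lst 0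

-- ===== PORT B =====
-- idx = next((i for i,e in enumerate(lst) if e % 2 == 0), len(lst)); sum(lst[:idx])
def sumUntilEven_alt (lst : List Int) : Int :=
  let idx := lst.findIdx (fun e => PySem.Int.mod e 2 == 0)
  (lst.take idx).sum

-- ===== PRECONDITION & SPEC =====
def Spec_sumUntilEven (lst : List Int) (out : Int) : Prop := out = sumUntilEven_alt lst
instance (lst : List Int) (out : Int) : Decidable (Spec_sumUntilEven lst out) := by unfold Spec_sumUntilEven; infer_instance

-- ===== CLAIM (what is proved, stated in full; the proofs are below) =====
def Claim_equal_sumUntilEven : Prop := ∀ (lst : List Int), Dom_sumUntilEven lst → Spec_sumUntilEven lst (sumUntilEven lst)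

-- ===== LEMMAS AND PROOFS =====

lemma loop_eq_alt (lst : List Int) (res : Int) :
    sumUntilEvenLoop lst res = res + sumUntilEven_alt lst := by
  induction lst generalizing res with
  | nil => simp [sumUntilEvenLoop, sumUntilEven_alt]
  | cons e rest ih =>
    have hm : PySem.Int.mod e 2 = e % 2 := PySem.Int.mod_eq_emod_of_pos (by norm_num)
    by_cases h : e % 2 = 1
    · simp [sumUntilEvenLoop, sumUntilEven_alt, hm, h, List.findIdx_cons, ih, Nat.add_comm 1]
      ring
    · have h0 : e % 2 = 0 := by have := Int.emod_two_eq e; tauto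
      simp [sumUntilEvenLoop, sumUntilEven_alt, hm, h, h0, List.findIdx_cons]

-- ===== VERDICT =====
theorem sumUntilEven_spec : Claim_equal_sumUntilEven := by
  intro lst _
  unfold Spec_sumUntilEven sumUntilEven
  split
  · next h => simp [List.length_eq_zero_iff.mp h, sumUntilEven_alt]
  · simpa using loop_eq_alt lst 0
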